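-- pv_equiv track=rewrite | github.com/8080509/Number_Theory | Python Code/AdmPinOrd.py | minValeSet
-- ===== SOURCE A (Python) =====
-- def minValeSet(P):
-- 	V = set()
-- 	count = len(P) + 1
-- 	i = 0
-- 	while count:
-- 		if i not in P: V.add(i); count -= 1
-- 		i += 1
-- 	return V
-- ===== SOURCE B (Python) =====
-- def minValeSet(P):
--     n = len(P)
--     pool = set(range(2 * n + 1)).difference(P)
--     return set(sorted(pool)[:n + 1])
-- ===== Notes on version B (the rewrite author's own statement) =====
-- stated objective: alternative
-- what changed: Replaces A's unbounded while-loop that tests each successive natural for membership in P by a single set difference over the fixed window range(2*len(P)+1) (large enough to contain the first len(P)+1 non-members), followed by sort and prefix slice.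
import Mathlib
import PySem

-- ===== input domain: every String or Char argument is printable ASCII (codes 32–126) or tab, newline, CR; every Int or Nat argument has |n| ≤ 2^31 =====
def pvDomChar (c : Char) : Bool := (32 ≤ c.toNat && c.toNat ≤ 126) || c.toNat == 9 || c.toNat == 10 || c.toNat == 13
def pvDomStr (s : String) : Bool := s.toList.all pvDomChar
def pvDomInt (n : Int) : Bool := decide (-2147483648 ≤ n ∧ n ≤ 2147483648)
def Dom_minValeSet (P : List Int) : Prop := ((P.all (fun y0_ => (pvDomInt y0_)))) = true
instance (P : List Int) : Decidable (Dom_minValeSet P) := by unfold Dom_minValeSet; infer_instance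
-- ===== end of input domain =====

-- B replaces A's unbounded membership-scanning while-loop by one set difference
-- over the window range(2*len(P)+1), then sort and slice (objective: alternative).

-- Termination measures for the loop ports: when i is in P, the number of
-- elements of P that are ≥ i strictly drops as i increases by one.
theorem pvFilterGeMono (P : List Int) (i : Int) :
    (P.filter (fun x => decide (i + 1 ≤ x))).length ≤ (P.filter (fun x => decide (i ≤ x))).length := by
  simp only [← List.countP_eq_length_filter]
  apply List.countP_mono_left
  intro x _ h; simp at h ⊢; omega

theorem pvFilterGeStrict (P : List Int) (i : Int) (h : i ∈ P) :
    (P.filter (fun x => decide (i + 1 ≤ x))).length < (P.filter (fun x => decide (i ≤ x))).length := by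
  induction P with
  | nil => simp at h
  | cons a t ih =>
    simp only [List.filter_cons]
    rcases List.mem_cons.mp h with rfl | hm
    · rw [show (decide (i + 1 ≤ i)) = false by simp, show (decide (i ≤ i)) = true by simp]
      simp only [if_pos, if_neg, Bool.false_eq_true, not_false_eq_true, List.length_cons]
      exact Nat.lt_succ_of_le (pvFilterGeMono t i)
    · have hlt := ih hm
      by_cases hb : (i + 1 : Int) ≤ a
      · have hc : i ≤ a := by omega
        simp only [hb, hc, decide_true, if_pos, List.length_cons]
        omega
      · by_cases hc : i ≤ a
        · simp only [hb, hc, decide_true, decide_false, if_pos, if_neg, Bool.false_eq_true,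
            not_false_eq_true, List.length_cons]
          omega
        · simp only [hb, hc, decide_false, if_neg, Bool.false_eq_true, not_false_eq_true]
          omega

-- ===== PORT A =====
-- while count: if i not in P: V.add(i); count -= 1; i += 1
def minValeSetLoop (P : List Int) : PySem.Set Int → Nat → Int → PySem.Set Int
  | V, 0, _ => V
  | V, c + 1, i =>
    if P.contains i then minValeSetLoop P V (c + 1) (i + 1)
    else minValeSetLoop P (PySem.Set.add V i) c (i + 1)
  termination_by _ c i => c + (P.filter (fun x => decide (i ≤ x))).length
  decreasing_by
  · have := pvFilterGeStrict P i (by simpa using ‹P.contains i = true›)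
    omega
  · have := pvFilterGeMono P i
    omega

def minValeSet (P : List Int) : List Int :=
  minValeSetLoop P PySem.Set.empty (P.length + 1) 0

-- ===== PORT B =====
-- n = len(P); pool = set(range(2*n+1)).difference(P); return set(sorted(pool)[:n+1])
def minValeSet_alt (P : List Int) : List Int :=
  let n : Nat := P.length
  let pool : PySem.Set Int :=
    PySem.Set.diff (PySem.Set.ofList (PySem.List.pyRange 0 (2 * (n : Int) + 1) 1)) P
  PySem.Set.ofList
    (PySem.List.slice (PySem.List.sorted pool (fun x => x) false) none (some ((n : Int) + 1)))

-- ===== PRECONDITION & SPEC =====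
def Spec_minValeSet (P : List Int) (out : List Int) : Prop := out = minValeSet_alt P
instance (P : List Int) (out : List Int) : Decidable (Spec_minValeSet P out) := by unfold Spec_minValeSet; infer_instance

-- ===== CLAIM (what is proved, stated in full; the proofs are below) =====
def Claim_equal_minValeSet : Prop := ∀ (P : List Int), Dom_minValeSet P → Spec_minValeSet P (minValeSet P)

-- ===== LEMMAS AND PROOFS =====

-- The list of the first c naturals ≥ i that are not members of P, in order.
def nextFree (P : List Int) : Nat → Int → List Int
  | 0, _ => []
  | c + 1, i =>
    if P.contains i then nextFree P (c + 1) (i + 1)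
    else i :: nextFree P c (i + 1)
  termination_by c i => c + (P.filter (fun x => decide (i ≤ x))).length
  decreasing_by
  · have := pvFilterGeStrict P i (by simpa using ‹P.contains i = true›)
    omega
  · have := pvFilterGeMono P i
    omega

theorem minValeSetLoop_eq_append (P : List Int) :
    ∀ (c : Nat) (i : Int) (V : PySem.Set Int), (∀ v ∈ V, v < i) →
      minValeSetLoop P V c i = V ++ nextFree P c i := by
  intro c i
  induction c, i using nextFree.induct P with
  | case1 i => intro V hV; simp [minValeSetLoop, nextFree]
  | case2 c i hc ih =>
    intro V hV
    rw [minValeSetLoop, nextFree, if_pos hc, if_pos hc]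
    exact ih V (fun v hv => by have := hV v hv; omega)
  | case3 c i hc ih =>
    intro V hV
    rw [minValeSetLoop, nextFree, if_neg hc, if_neg hc]
    have hni : i ∉ V := fun hm => absurd (hV i hm) (lt_irrefl i)
    rw [PySem.Set.add_of_not_mem hni]
    rw [ih (V ++ [i]) (by intro v hv; rcases List.mem_append.mp hv with h | h
                          · have := hV v h; omega
                          · simp at h; omega)]
    simp

-- consecutive integers i, i+1, …, i+m-1
def consec (i : Int) : Nat → List Int
  | 0 => []
  | m + 1 => i :: consec (i + 1) m

theorem consec_eq_pyRange (m : Nat) (i : Int) :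
    consec i m = PySem.List.pyRange i (i + m) 1 := by
  induction m generalizing i with
  | zero => simp [consec, PySem.List.pyRange_one_eq_nil]
  | succ m ih =>
    rw [consec, PySem.List.pyRange_one_cons (by push_cast; omega), ih (i + 1)]
    congr 2
    push_cast
    omega

theorem nextFree_eq_take (P : List Int) (m : Nat) :
    ∀ (i : Int) (c : Nat),
      c ≤ ((consec i m).filter (fun x => !P.contains x)).length →
      nextFree P c i = ((consec i m).filter (fun x => !P.contains x)).take c := by
  induction m with
  | zero =>
    intro i c h
    simp only [consec, List.filter_nil, List.length_nil, Nat.le_zero] at h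
    subst h
    simp [nextFree]
  | succ m ih =>
    intro i c h
    cases c with
    | zero => simp [nextFree]
    | succ c =>
      by_cases hc : P.contains i
      · have hfil : (consec i (m + 1)).filter (fun x => !P.contains x)
            = (consec (i + 1) m).filter (fun x => !P.contains x) := by
          simp [consec, List.filter_cons]; simpa using hc
        rw [hfil] at h ⊢
        rw [nextFree, if_pos hc]
        exact ih (i + 1) (c + 1) h
      · have hfil : (consec i (m + 1)).filter (fun x => !P.contains x)
            = i :: (consec (i + 1) m).filter (fun x => !P.contains x) := by
          simp [consec, List.filter_cons]; simpa using hc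
        rw [hfil] at h ⊢
        rw [nextFree, if_neg hc, List.take_succ_cons]
        simp only [List.length_cons] at h
        rw [ih (i + 1) c (by omega)]

-- ===== VERDICT (by name: the statement is the Claim_ definition above) =====
theorem pvFilterSplit (l : List Int) (p : Int → Bool) :
    (l.filter p).length + (l.filter (fun x => !p x)).length = l.length := by
  simp only [← List.countP_eq_length_filter]
  rw [l.length_eq_countP_add_countP p]
  congr 1
  apply List.countP_congr
  intro x _
  simp

theorem minValeSet_spec : Claim_equal_minValeSet := by
  intro P _
  unfold Spec_minValeSet minValeSet minValeSet_alt
  dsimp only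
  set n := P.length with hn
  set R := PySem.List.pyRange 0 (2 * (n : Int) + 1) 1 with hRdef
  set L := R.filter (fun x => !P.contains x) with hLdef
  have hRnodup : R.Nodup := PySem.List.nodup_pyRange_one 0 (2 * (n : Int) + 1)
  have hLnodup : L.Nodup := hRnodup.filter _
  have hconsec : consec 0 (2 * n + 1) = R := by
    rw [consec_eq_pyRange, hRdef]
    congr 1
    push_cast
    omega
  -- at most n of the 2n+1 window values are removed by the filter
  have hmemLe : (R.filter (fun x => P.contains x)).length ≤ n := by
    have hnd : (R.filter (fun x => P.contains x)).Nodup := hRnodup.filter _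
    have hsub : (R.filter (fun x => P.contains x)) ⊆ P := by
      intro x hx
      have := (List.mem_filter.mp hx).2
      simpa using this
    exact (hnd.subperm hsub).length_le
  have hRlen : R.length = 2 * n + 1 := by
    rw [hRdef, PySem.List.length_pyRange_one]
    omega
  have hLlen : n + 1 ≤ L.length := by
    have := pvFilterSplit R (fun x => P.contains x)
    rw [hRlen] at this
    rw [hLdef]
    omega
  -- A computes the first n+1 window survivors
  have hA : minValeSetLoop P PySem.Set.empty (n + 1) 0 = L.take (n + 1) := by
    rw [minValeSetLoop_eq_append P (n + 1) 0 PySem.Set.empty (by intro v hv; simp [PySem.Set.empty] at hv)]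
    rw [nextFree_eq_take P (2 * n + 1) 0 (n + 1) (by rw [hconsec]; exact hLlen)]
    rw [hconsec]
    rfl
  -- B sorts the set difference and takes the same prefix
  have hofR : PySem.Set.ofList R = R := PySem.Set.ofList_eq_self_of_nodup R hRnodup
  have hpoolnodup : (PySem.Set.diff (PySem.Set.ofList R) P).Nodup := by
    rw [hofR]
    exact PySem.Set.nodup_diff R P hRnodup
  have hperm : L.Perm (PySem.Set.diff (PySem.Set.ofList R) P) := by
    rw [(List.perm_ext_iff_of_nodup hLnodup hpoolnodup)]
    intro x
    rw [PySem.Set.mem_diff, hofR, hLdef, List.mem_filter]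
    simp
  have hsorted : PySem.List.sorted (PySem.Set.diff (PySem.Set.ofList R) P) (fun x => x) false = L := by
    exact PySem.List.sorted_eq_of_perm_of_pairwise_lt _ _ _ hperm
      ((PySem.List.pairwise_lt_pyRange_one 0 (2 * (n : Int) + 1)).filter _)
  rw [hsorted]
  have hslice : PySem.List.slice L none (some ((n : Int) + 1)) = L.take (n + 1) := by
    have : ((n : Int) + 1) = ((n + 1 : Nat) : Int) := by push_cast; ring
    rw [this, PySem.List.slice_to_natCast]
  rw [hslice]
  rw [PySem.Set.ofList_eq_self_of_nodup _ (hLnodup.sublist (List.take_sublist _ _))]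
  exact hA
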